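-- pv_equiv track=rewrite | github.com/jsuchenia/adventofcode | 2023/1/trebuchet_test.py | convert
-- ===== SOURCE A (Python) =====
-- MAGIC_WORDS = {"one": "1", "two": "2", "three": "3", "four": "4", "five": "5", "six": "6", "seven": "7", "eight": "8", "nine": "9"}
--
-- def convert(line: str):
--     out = ""
--     for idx in range(len(line)):
--         if line[idx].isdigit():
--             out += line[idx]
--             continue
--
--         for key, value in MAGIC_WORDS.items():
--             if line[idx:].startswith(key):
--                 out += value
--                 break
--     return out
-- ===== SOURCE B (Python) =====
-- MAGIC_WORDS = {"one": "1", "two": "2", "three": "3", "four": "4", "five": "5", "six": "6", "seven": "7", "eight": "8", "nine": "9"}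
--
-- PATTERNS = [(str(d), str(d)) for d in range(10)] + list(MAGIC_WORDS.items())
--
-- def convert(line: str):
--     hits = []
--     for pat, digit in PATTERNS:
--         pos = line.find(pat)
--         while pos != -1:
--             hits.append((pos, digit))
--             pos = line.find(pat, pos + 1)
--     hits.sort(key=lambda h: h[0])
--     return "".join(digit for _, digit in hits)
-- ===== Notes on version B (the rewrite author's own statement) =====
-- stated objective: faster
-- what changed: Instead of scanning every position and testing all 9 words with startswith on a fresh suffix copy (A), B loops over the 19 fixed patterns (ten digit chars and nine words), collects all occurrence positions of each with str.find's C-level search, sorts the (position, digit) pairs by position and joins the digits.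
import Mathlib
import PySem

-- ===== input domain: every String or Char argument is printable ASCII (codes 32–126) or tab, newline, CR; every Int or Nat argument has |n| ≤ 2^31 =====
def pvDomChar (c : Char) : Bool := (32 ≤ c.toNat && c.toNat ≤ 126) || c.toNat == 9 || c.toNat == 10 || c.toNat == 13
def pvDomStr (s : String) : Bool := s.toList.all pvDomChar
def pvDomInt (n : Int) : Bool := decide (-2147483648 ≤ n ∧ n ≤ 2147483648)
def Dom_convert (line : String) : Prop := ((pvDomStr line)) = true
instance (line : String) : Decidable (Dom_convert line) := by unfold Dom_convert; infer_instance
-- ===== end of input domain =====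

-- B replaces A's per-position scan (9 startswith tests on a fresh suffix copy at every index)
-- by a pattern-major algorithm: collect all occurrence positions of each of the 19 patterns
-- with repeated str.find, sort the (position, digit) pairs by position, join (objective: faster).

-- ===== PORT A =====
def MAGIC_WORDS : List (String × String) :=
  [("one", "1"), ("two", "2"), ("three", "3"), ("four", "4"), ("five", "5"),
   ("six", "6"), ("seven", "7"), ("eight", "8"), ("nine", "9")]

-- the inner 'for key, value in MAGIC_WORDS.items(): if line[idx:].startswith(key): out += value; break'
def magicLoop : List (String × String) → String → String → String
  | [], _, out => out
  | (k, v) :: rest, suf, out =>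
    if PySem.Str.startswith suf k then out ++ v else magicLoop rest suf out

def convert (line : String) : String :=
  (PySem.List.pyRange 0 (PySem.Str.len line) 1).foldl
    (fun out idx =>
      match PySem.Str.pyGet? line idx with
      | none => out  -- unreachable: idx ∈ range(len(line))
      | some c =>
        if PySem.Chars.isdigit c then out ++ String.singleton c
        else magicLoop MAGIC_WORDS (PySem.Str.slice line (some idx) none) out) ""

-- ===== PORT B =====
def PATTERNS : List (String × String) :=
  [("0", "0"), ("1", "1"), ("2", "2"), ("3", "3"), ("4", "4"),
   ("5", "5"), ("6", "6"), ("7", "7"), ("8", "8"), ("9", "9"),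
   ("one", "1"), ("two", "2"), ("three", "3"), ("four", "4"), ("five", "5"),
   ("six", "6"), ("seven", "7"), ("eight", "8"), ("nine", "9")]

-- the inner 'pos = line.find(pat); while pos != -1: hits.append((pos, digit)); pos = line.find(pat, pos + 1)'
-- (the fuel argument is a totality guard only: positions strictly increase, so len(line)+1 steps always suffice)
def findLoop (line pat digit : String) : Nat → Int → List (Int × String)
  | 0, _ => []
  | fuel + 1, pos =>
    if pos = -1 then []
    else (pos, digit) :: findLoop line pat digit fuel (PySem.Str.findFrom line pat (pos + 1))

def convert_alt (line : String) : String :=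
  let hits := PATTERNS.foldl
    (fun hits pd =>
      hits ++ findLoop line pd.1 pd.2 (line.toList.length + 1) (PySem.Str.find line pd.1)) []
  PySem.Str.join "" ((PySem.List.sorted hits (fun h => h.1)).map (fun h => h.2))

-- ===== PRECONDITION & SPEC =====
def Spec_convert (line : String) (out : String) : Prop := out = convert_alt line
instance (line : String) (out : String) : Decidable (Spec_convert line out) := by unfold Spec_convert; infer_instance

-- ===== CLAIM (what is proved, stated in full; the proofs are below) =====
def Claim_equal_convert : Prop := ∀ (line : String), Dom_convert line → Spec_convert line (convert line)

-- ===== LEMMAS AND PROOFS =====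

-- A's inner 9-way word chain, as a function of the suffix
def tokW (s : List Char) : List Char :=
  if PySem.Chars.startswith s "one".toList then ['1']
  else if PySem.Chars.startswith s "two".toList then ['2']
  else if PySem.Chars.startswith s "three".toList then ['3']
  else if PySem.Chars.startswith s "four".toList then ['4']
  else if PySem.Chars.startswith s "five".toList then ['5']
  else if PySem.Chars.startswith s "six".toList then ['6']
  else if PySem.Chars.startswith s "seven".toList then ['7']
  else if PySem.Chars.startswith s "eight".toList then ['8']
  else if PySem.Chars.startswith s "nine".toList then ['9']
  else []

-- A's token at a suffix
def tokA : List Char → List Char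
  | [] => []
  | c :: rest => if PySem.Chars.isdigit c then [c] else tokW (c :: rest)

-- ===== A side =====

lemma magicLoop_eq (suf : String) (out : String) :
    magicLoop MAGIC_WORDS suf out = out ++ String.ofList (tokW suf.toList) := by
  simp only [MAGIC_WORDS, magicLoop, tokW, PySem.Str.startswith_eq]
  split_ifs <;> simp

lemma foldl_append_toList {α : Type} (l : List α) (f : α → String) (a : String) :
    (l.foldl (fun out x => out ++ f x) a).toList
      = a.toList ++ (l.map (fun x => (f x).toList)).flatten := by
  induction l generalizing a with
  | nil => simp
  | cons x t ih => simp [ih, String.toList_append]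

lemma stepA (line : String) (i : Nat) (out : String) :
    (match PySem.Str.pyGet? line (i : Int) with
     | none => out
     | some c =>
       if PySem.Chars.isdigit c then out ++ String.singleton c
       else magicLoop MAGIC_WORDS (PySem.Str.slice line (some (i : Int)) none) out)
      = out ++ String.ofList (tokA (line.toList.drop i)) := by
  rw [PySem.Str.pyGet?_natCast]
  cases h : line.toList[i]? with
  | none =>
    have hle : line.toList.length ≤ i := List.getElem?_eq_none_iff.mp h
    simp [List.drop_eq_nil_of_le hle, tokA]
  | some c =>
    have hlt : i < line.toList.length := (List.getElem?_eq_some_iff.mp h).1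
    have hc : line.toList[i] = c := (List.getElem?_eq_some_iff.mp h).2
    have hdrop : line.toList.drop i = c :: line.toList.drop (i + 1) := by
      rw [List.drop_eq_getElem_cons hlt, hc]
    rw [hdrop]
    by_cases hd : PySem.Chars.isdigit c
    · simp [tokA, hd]
      rfl
    · simp only [hd, Bool.false_eq_true, if_false]
      rw [magicLoop_eq]
      have hsuf : (PySem.Str.slice line (some (i : Int)) none).toList = line.toList.drop i := by
        simp [PySem.List.slice_from _ (by positivity : (0 : Int) ≤ (i : Int))]
      rw [hsuf, hdrop]
      simp [tokA, hd]

lemma mainA (line : String) :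
    (convert line).toList
      = ((List.range line.toList.length).map (fun i => tokA (line.toList.drop i))).flatten := by
  unfold convert
  rw [PySem.Str.len_eq, PySem.List.pyRange_zero_natCast, List.foldl_map]
  rw [PySem.List.foldl_congr_mem _ _
    (fun out i => out ++ String.ofList (tokA (line.toList.drop i))) _
    (fun acc x _ => stepA line x acc)]
  rw [foldl_append_toList]
  simp

-- ===== B side =====

lemma findLoop_spec (line pat d : String) (hp : pat.toList ≠ []) :
    ∀ (fuel k : Nat), k ≤ line.toList.length → line.toList.length + 1 - k ≤ fuel →
      findLoop line pat d fuel (PySem.Chars.findFrom line.toList pat.toList (k : Int)) =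
        ((List.range' k (line.toList.length - k)).filter
            (fun i => decide (pat.toList <+: line.toList.drop i))).map
          (fun (i : Nat) => ((i : Int), d)) := by
  intro fuel
  induction fuel with
  | zero => intro k hk hf; omega
  | succ fuel ih =>
    intro k hk hf
    by_cases h : PySem.Chars.findFrom line.toList pat.toList (k : Int) = -1
    · rw [findLoop, if_pos h]
      symm
      rw [List.map_eq_nil_iff, List.filter_eq_nil_iff]
      intro i hi hP
      rw [List.mem_range'] at hi
      rw [PySem.Chars.findFrom_natCast_eq_neg_one_iff _ _ k hk] at h
      apply h
      rw [← PySem.Chars.isIn_iff_infix, ← PySem.Chars.exists_prefix_drop_iff_isIn]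
      refine ⟨i - k, ?_⟩
      rw [List.drop_drop, show k + (i - k) = i by omega]
      exact of_decide_eq_true hP
    · obtain ⟨hkr, hpre, hmin⟩ := PySem.Chars.findFrom_natCast_spec line.toList pat.toList k hk h
      set r := PySem.Chars.findFrom line.toList pat.toList (k : Int) with hrdef
      have hr0 : (0 : Int) ≤ r := le_trans (by positivity) hkr
      have hreq : r = ((r.toNat : Nat) : Int) := by omega
      have hkrn : k ≤ r.toNat := by omega
      have hrlt : r.toNat < line.toList.length := by
        by_contra hge
        have : line.toList.drop r.toNat = [] := List.drop_eq_nil_of_le (by omega)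
        rw [this] at hpre
        exact hp (List.prefix_nil.mp hpre)
      rw [findLoop, if_neg h]
      have hsplit : List.range' k (line.toList.length - k)
          = List.range' k (r.toNat - k) ++ (r.toNat :: List.range' (r.toNat + 1) (line.toList.length - (r.toNat + 1))) := by
        rw [show r.toNat :: List.range' (r.toNat + 1) (line.toList.length - (r.toNat + 1))
              = List.range' r.toNat ((line.toList.length - (r.toNat + 1)) + 1) from by
            simpa using (List.range'_succ (s := r.toNat) (n := line.toList.length - (r.toNat + 1)) (step := 1))]
        rw [show List.range' r.toNat (line.toList.length - (r.toNat + 1) + 1)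
              = List.range' (k + 1 * (r.toNat - k)) (line.toList.length - (r.toNat + 1) + 1) from by
            congr 1; omega]
        rw [List.range'_append]
        congr 1
        omega
      rw [hsplit, List.filter_append]
      have hfilt1 : (List.range' k (r.toNat - k)).filter
          (fun i => decide (pat.toList <+: line.toList.drop i)) = [] := by
        rw [List.filter_eq_nil_iff]
        intro i hi
        rw [List.mem_range'] at hi
        simpa using hmin i (by omega) (by omega)
      rw [hfilt1, List.nil_append, List.filter_cons_of_pos (by simpa using hpre), List.map_cons]
      congr 1
      · exact congrArg (fun z : Int => (z, d)) hreq
      · have hih := ih (r.toNat + 1) (by omega) (by omega)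
        rw [← hih]
        rw [PySem.Str.findFrom_eq, show (r + 1 : Int) = ((r.toNat + 1 : Nat) : Int) by omega]

-- hits as a flatMap of per-pattern occurrence lists
lemma hits_eq (line : String) :
    PATTERNS.foldl
        (fun hits pd =>
          hits ++ findLoop line pd.1 pd.2 (line.toList.length + 1) (PySem.Str.find line pd.1)) []
      = PATTERNS.flatMap (fun pd =>
          ((List.range line.toList.length).filter
              (fun i => decide (pd.1.toList <+: line.toList.drop i))).map
            (fun (i : Nat) => ((i : Int), pd.2))) := by
  rw [PySem.List.foldl_append_eq_flatMap, List.nil_append]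
  apply List.flatMap_congr
  intro pd hpd
  have hp : pd.1.toList ≠ [] := by
    have : ∀ q ∈ PATTERNS, q.1.toList ≠ [] := by decide
    exact this pd hpd
  have h0 : PySem.Str.find line pd.1 = PySem.Chars.findFrom line.toList pd.1.toList ((0 : Nat) : Int) := by
    rw [PySem.Str.find_eq, show (((0 : Nat) : Int)) = (0 : Int) by norm_num,
      PySem.Chars.findFrom_zero]
  rw [h0, findLoop_spec line pd.1 pd.2 hp (line.toList.length + 1) 0 (by omega) (by omega)]
  rw [List.range_eq_range', Nat.sub_zero]

-- the target, strictly-increasing list of (position, token) pairs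
def toks (line : String) : List (Int × String) :=
  (List.range line.toList.length).filterMap
    (fun i => if tokA (line.toList.drop i) = [] then none
              else some ((i : Int), String.ofList (tokA (line.toList.drop i))))

lemma char_eq_of_toNat {c d : Char} (h : c.toNat = d.toNat) : c = d := by
  rw [Char.ext_iff]; exact UInt32.toNat_inj.mp h

lemma isdigit_bounds (c : Char) (h : PySem.Chars.isdigit c = true) : 48 ≤ c.toNat ∧ c.toNat ≤ 57 := by
  unfold PySem.Chars.isdigit at h
  rw [Bool.and_eq_true, decide_eq_true_iff, decide_eq_true_iff] at h
  obtain ⟨h1, h2⟩ := h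
  rw [Char.le_def, UInt32.le_iff_toNat_le] at h1 h2
  exact ⟨h1, h2⟩

lemma digit_cases (c : Char) (h : PySem.Chars.isdigit c = true) :
    c = '0' ∨ c = '1' ∨ c = '2' ∨ c = '3' ∨ c = '4' ∨ c = '5' ∨ c = '6' ∨ c = '7' ∨ c = '8' ∨ c = '9' := by
  obtain ⟨h1, h2⟩ := isdigit_bounds c h
  interval_cases h' : c.toNat <;>
    first
      | exact Or.inl (char_eq_of_toNat h')
      | exact Or.inr (Or.inl (char_eq_of_toNat h'))
      | exact Or.inr (Or.inr (Or.inl (char_eq_of_toNat h')))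
      | exact Or.inr (Or.inr (Or.inr (Or.inl (char_eq_of_toNat h'))))
      | exact Or.inr (Or.inr (Or.inr (Or.inr (Or.inl (char_eq_of_toNat h')))))
      | exact Or.inr (Or.inr (Or.inr (Or.inr (Or.inr (Or.inl (char_eq_of_toNat h'))))))
      | exact Or.inr (Or.inr (Or.inr (Or.inr (Or.inr (Or.inr (Or.inl (char_eq_of_toNat h')))))))
      | exact Or.inr (Or.inr (Or.inr (Or.inr (Or.inr (Or.inr (Or.inr (Or.inl (char_eq_of_toNat h'))))))))
      | exact Or.inr (Or.inr (Or.inr (Or.inr (Or.inr (Or.inr (Or.inr (Or.inr (Or.inl (char_eq_of_toNat h')))))))))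
      | exact Or.inr (Or.inr (Or.inr (Or.inr (Or.inr (Or.inr (Or.inr (Or.inr (Or.inr (char_eq_of_toNat h')))))))))

-- soundness: a matching pattern determines A's token
lemma tokA_of_match : ∀ (t : List Char), ∀ pd ∈ PATTERNS, pd.1.toList <+: t → tokA t = pd.2.toList := by
  intro t pd hpd hpre
  fin_cases hpd <;>
    · obtain ⟨u, hu⟩ := hpre
      subst hu
      simp [tokA, tokW, PySem.Chars.isdigit, PySem.Chars.startswith]

-- completeness: a nonempty A-token comes from a matching pattern
lemma match_of_tokA : ∀ (t : List Char), tokA t ≠ [] → ∃ pd ∈ PATTERNS, pd.1.toList <+: t := by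
  intro t h
  cases t with
  | nil => simp [tokA] at h
  | cons c rest =>
    by_cases hd : PySem.Chars.isdigit c
    · rcases digit_cases c hd with rfl | rfl | rfl | rfl | rfl | rfl | rfl | rfl | rfl | rfl
      · exact ⟨("0", "0"), by decide, ⟨rest, rfl⟩⟩
      · exact ⟨("1", "1"), by decide, ⟨rest, rfl⟩⟩
      · exact ⟨("2", "2"), by decide, ⟨rest, rfl⟩⟩
      · exact ⟨("3", "3"), by decide, ⟨rest, rfl⟩⟩
      · exact ⟨("4", "4"), by decide, ⟨rest, rfl⟩⟩
      · exact ⟨("5", "5"), by decide, ⟨rest, rfl⟩⟩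
      · exact ⟨("6", "6"), by decide, ⟨rest, rfl⟩⟩
      · exact ⟨("7", "7"), by decide, ⟨rest, rfl⟩⟩
      · exact ⟨("8", "8"), by decide, ⟨rest, rfl⟩⟩
      · exact ⟨("9", "9"), by decide, ⟨rest, rfl⟩⟩
    · rw [tokA, if_neg hd] at h
      unfold tokW at h
      split_ifs at h with h1 h2 h3 h4 h5 h6 h7 h8 h9
      · exact ⟨("one", "1"), by decide, (PySem.Chars.startswith_iff _ _).mp h1⟩
      · exact ⟨("two", "2"), by decide, (PySem.Chars.startswith_iff _ _).mp h2⟩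
      · exact ⟨("three", "3"), by decide, (PySem.Chars.startswith_iff _ _).mp h3⟩
      · exact ⟨("four", "4"), by decide, (PySem.Chars.startswith_iff _ _).mp h4⟩
      · exact ⟨("five", "5"), by decide, (PySem.Chars.startswith_iff _ _).mp h5⟩
      · exact ⟨("six", "6"), by decide, (PySem.Chars.startswith_iff _ _).mp h6⟩
      · exact ⟨("seven", "7"), by decide, (PySem.Chars.startswith_iff _ _).mp h7⟩
      · exact ⟨("eight", "8"), by decide, (PySem.Chars.startswith_iff _ _).mp h8⟩
      · exact ⟨("nine", "9"), by decide, (PySem.Chars.startswith_iff _ _).mp h9⟩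
      · simp at h

lemma pfree : ∀ a ∈ PATTERNS, ∀ b ∈ PATTERNS, a.1.toList <+: b.1.toList → a.1 = b.1 := by decide

lemma toks_mem (line : String) (x : Int × String) :
    x ∈ toks line ↔ ∃ i : Nat, i < line.toList.length ∧ tokA (line.toList.drop i) ≠ [] ∧
      x = ((i : Int), String.ofList (tokA (line.toList.drop i))) := by
  simp only [toks, List.mem_filterMap, List.mem_range]
  constructor
  · rintro ⟨i, hi, hf⟩
    by_cases h : tokA (line.toList.drop i) = []
    · simp [h] at hf
    · rw [if_neg h, Option.some_inj] at hf
      exact ⟨i, hi, h, hf.symm⟩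
  · rintro ⟨i, hi, h, rfl⟩
    exact ⟨i, hi, by rw [if_neg h]⟩

lemma hits_mem (line : String) (x : Int × String) :
    x ∈ PATTERNS.flatMap (fun pd =>
          ((List.range line.toList.length).filter
              (fun i => decide (pd.1.toList <+: line.toList.drop i))).map
            (fun (i : Nat) => ((i : Int), pd.2)))
      ↔ ∃ pd ∈ PATTERNS, ∃ i : Nat, i < line.toList.length ∧ pd.1.toList <+: line.toList.drop i ∧
          x = ((i : Int), pd.2) := by
  simp only [List.mem_flatMap, List.mem_map, List.mem_filter, List.mem_range, decide_eq_true_iff]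
  constructor
  · rintro ⟨pd, hpd, i, ⟨hi, hpre⟩, rfl⟩
    exact ⟨pd, hpd, i, hi, hpre, rfl⟩
  · rintro ⟨pd, hpd, i, hi, hpre, rfl⟩
    exact ⟨pd, hpd, i, ⟨hi, hpre⟩, rfl⟩

lemma p2ne : ∀ pd ∈ PATTERNS, pd.2.toList ≠ [] := by decide

lemma mem_iff (line : String) (x : Int × String) :
    x ∈ PATTERNS.flatMap (fun pd =>
          ((List.range line.toList.length).filter
              (fun i => decide (pd.1.toList <+: line.toList.drop i))).map
            (fun (i : Nat) => ((i : Int), pd.2)))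
      ↔ x ∈ toks line := by
  rw [hits_mem, toks_mem]
  constructor
  · rintro ⟨pd, hpd, i, hi, hpre, rfl⟩
    have ht := tokA_of_match _ pd hpd hpre
    exact ⟨i, hi, by rw [ht]; exact p2ne pd hpd, by rw [ht, String.ofList_toList]⟩
  · rintro ⟨i, hi, hne, rfl⟩
    obtain ⟨pd, hpd, hpre⟩ := match_of_tokA _ hne
    have ht := tokA_of_match _ pd hpd hpre
    exact ⟨pd, hpd, i, hi, hpre, by rw [ht, String.ofList_toList]⟩

lemma nodup_hits (line : String) :
    (PATTERNS.flatMap (fun pd =>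
          ((List.range line.toList.length).filter
              (fun i => decide (pd.1.toList <+: line.toList.drop i))).map
            (fun (i : Nat) => ((i : Int), pd.2)))).Nodup := by
  rw [List.nodup_flatMap]
  constructor
  · intro pd _
    apply List.Nodup.map
    · intro a b hab
      simpa using congrArg Prod.fst hab
    · exact (List.nodup_range).filter _
  · have hne : PATTERNS.Pairwise (fun a b => a.1 ≠ b.1) := by decide
    apply hne.imp_of_mem
    intro a b ha hb hab x hxa hxb
    simp only [List.mem_map, List.mem_filter, List.mem_range, decide_eq_true_iff] at hxa hxb
    obtain ⟨i, ⟨hi, hpi⟩, rfl⟩ := hxa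
    obtain ⟨j, ⟨hj, hpj⟩, hx⟩ := hxb
    have hij : i = j := by
      have := congrArg Prod.fst hx
      simpa using this.symm
    subst hij
    rcases List.prefix_or_prefix_of_prefix hpi hpj with hab' | hab'
    · exact hab (pfree a ha b hb hab')
    · exact hab (pfree b hb a ha hab').symm

lemma pairwise_toks (line : String) :
    (toks line).Pairwise (fun a b => a.1 < b.1) := by
  unfold toks
  rw [List.pairwise_filterMap]
  apply (List.pairwise_lt_range).imp_of_mem
  intro a b _ _ hab x hx y hy
  by_cases ha : tokA (line.toList.drop a) = [] <;> simp [ha] at hx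
  by_cases hb : tokA (line.toList.drop b) = [] <;> simp [hb] at hy
  subst hx; subst hy
  simpa using hab

lemma nodup_toks (line : String) : (toks line).Nodup := by
  apply (pairwise_toks line).imp
  intro a b h heq
  rw [heq] at h
  exact lt_irrefl _ h

lemma sorted_hits (line : String) :
    PySem.List.sorted
        (PATTERNS.flatMap (fun pd =>
          ((List.range line.toList.length).filter
              (fun i => decide (pd.1.toList <+: line.toList.drop i))).map
            (fun (i : Nat) => ((i : Int), pd.2))))
        (fun h => h.1)
      = toks line := by
  apply PySem.List.sorted_eq_of_perm_of_pairwise_lt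
  · exact (List.perm_ext_iff_of_nodup (nodup_toks line) (nodup_hits line)).mpr
      (fun x => (mem_iff line x).symm)
  · exact pairwise_toks line

lemma flatten_toks (line : String) :
    ((toks line).map (fun h => h.2.toList)).flatten
      = ((List.range line.toList.length).map (fun i => tokA (line.toList.drop i))).flatten := by
  unfold toks
  induction List.range line.toList.length with
  | nil => rfl
  | cons a t ih =>
    by_cases h : tokA (line.toList.drop a) = [] <;>
      simp [h, ih, String.toList_ofList]

lemma join_nil_flatten (l : List (List Char)) : PySem.Chars.join [] l = l.flatten := by
  have h : ∀ m : List (List Char), (List.intersperse ([] : List Char) m).flatten = m.flatten := by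
    intro m
    induction m with
    | nil => rfl
    | cons a t ih => cases t <;> simp_all
  simpa [PySem.Chars.join, List.intercalate] using h l

lemma mainB (line : String) :
    (convert_alt line).toList
      = ((List.range line.toList.length).map (fun i => tokA (line.toList.drop i))).flatten := by
  simp only [convert_alt]
  rw [hits_eq, sorted_hits]
  rw [PySem.Str.toList_join, show ("" : String).toList = [] from rfl, join_nil_flatten,
    List.map_map]
  exact flatten_toks line

-- ===== VERDICT (by name: the statement is the Claim_ definition above) =====
theorem convert_spec : Claim_equal_convert := by
  intro line _
  unfold Spec_convert
  rw [← String.toList_inj, mainA, mainB]
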